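-- pv_equiv track=rewrite | github.com/lewisir/Advent-of-Code-2024 | Day7/aoc_day7.py | perm_calculation
-- ===== SOURCE A (Python) =====
-- def perm_calculation(target, sequence):
--     """Output all of the possible addition and multiplications of the sequence"""
--     permutations = 2 ** (len(sequence) - 1)
--     for perm in range(permutations):
--         calc_result = sequence[0]
--         for bit in range(len(sequence) - 1):
--             if 2**bit & perm == 0:
--                 calc_result += sequence[bit + 1]
--             elif 2**bit & perm != 0:
--                 calc_result *= sequence[bit + 1]
--             if calc_result > target:
--                 continue
--         if calc_result == target:
--             return True
--     return False
-- ===== SOURCE B (Python) =====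
-- def perm_calculation(target, sequence):
--     """DFS over the operator choices: recurse on the tail carrying the running
--     result, trying '+' then '*', with short-circuit on the first success."""
--     if not sequence:
--         return False
--
--     def reach(acc, i):
--         if i == len(sequence):
--             return acc == target
--         return reach(acc + sequence[i], i + 1) or reach(acc * sequence[i], i + 1)
--
--     return reach(sequence[0], 1)
-- ===== Notes on version B (the rewrite author's own statement) =====
-- stated objective: alternative
-- what changed: Replaced the exhaustive enumeration of all 2^(n-1) operator bitmasks (with bit-arithmetic decoding of each mask) by a short-circuiting DFS recursion over the list that carries the running result and tries + then * at each element.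
import Mathlib
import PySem

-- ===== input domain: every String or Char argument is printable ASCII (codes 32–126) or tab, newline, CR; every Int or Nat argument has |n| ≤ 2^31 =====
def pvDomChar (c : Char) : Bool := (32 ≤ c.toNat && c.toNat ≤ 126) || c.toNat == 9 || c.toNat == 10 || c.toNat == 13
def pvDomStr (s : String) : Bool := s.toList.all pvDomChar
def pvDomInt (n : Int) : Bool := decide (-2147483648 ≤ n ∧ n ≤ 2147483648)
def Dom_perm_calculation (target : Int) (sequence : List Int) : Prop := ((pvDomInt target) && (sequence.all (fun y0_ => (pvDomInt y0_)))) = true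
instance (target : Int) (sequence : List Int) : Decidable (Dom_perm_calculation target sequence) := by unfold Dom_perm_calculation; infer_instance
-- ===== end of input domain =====

-- B replaces A's exhaustive bitmask enumeration by a short-circuiting DFS recursion
-- over the operator choices (objective: alternative; same worst case, no bit arithmetic).


-- ===== PORT A =====
-- literal transliteration of A: enumerate every bitmask perm, fold the operations
-- left to right (bit b chooses + or * for sequence[b+1]), early return via .any.
-- indices 0 and bit+1 are always in range on Pre_ inputs, so getD's default is never used.
def perm_calculation (target : Int) (sequence : List Int) : Bool :=
  (List.range (2 ^ (sequence.length - 1))).any (fun perm =>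
    let calc_result := (List.range (sequence.length - 1)).foldl
      (fun acc bit =>
        if 2 ^ bit &&& perm == 0 then acc + sequence.getD (bit + 1) 0
        else acc * sequence.getD (bit + 1) 0)
      (sequence.getD 0 0)
    calc_result == target)

-- ===== PORT B =====
-- B's recursion `reach(acc, i)` over the tail, with `||` short-circuit.
def pvReach (target : Int) (acc : Int) : List Int → Bool
  | [] => acc == target
  | x :: xs => pvReach target (acc + x) xs || pvReach target (acc * x) xs

def perm_calculation_alt (target : Int) (sequence : List Int) : Bool :=
  match sequence with
  | [] => false
  | h :: t => pvReach target h t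

-- ===== PRECONDITION & SPEC =====
-- A raises TypeError on the empty sequence (2 ** -1 is a float, range fails); Pre_ excludes it.
def Pre_perm_calculation (target : Int) (sequence : List Int) : Prop := sequence ≠ []
instance (target : Int) (sequence : List Int) : Decidable (Pre_perm_calculation target sequence) := by unfold Pre_perm_calculation; infer_instance
def pvWitness_perm_calculation : Int × List Int := (6, [2, 3])

def Spec_perm_calculation (target : Int) (sequence : List Int) (out : Bool) : Prop := out = perm_calculation_alt target sequence
instance (target : Int) (sequence : List Int) (out : Bool) : Decidable (Spec_perm_calculation target sequence out) := by unfold Spec_perm_calculation; infer_instance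

-- ===== CLAIM (what is proved, stated in full; the proofs are below) =====
def Claim_equal_perm_calculation : Prop := ∀ (target : Int) (sequence : List Int), Dom_perm_calculation target sequence → Pre_perm_calculation target sequence → Spec_perm_calculation target sequence (perm_calculation target sequence)

-- ===== LEMMAS AND PROOFS =====

-- structural reading of A's inner fold: bit b of perm decides + or * for element b of t
def pvSim (acc : Int) : List Int → Nat → Int
  | [], _ => acc
  | x :: xs, p => pvSim (if p % 2 == 0 then acc + x else acc * x) xs (p / 2)

theorem pv_pow_and_eq_zero (b p : Nat) : ((2 ^ b &&& p) == 0) = !(p.testBit b) := by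
  rw [Nat.and_comm, Nat.and_two_pow]
  cases h : p.testBit b <;> simp [h]

theorem pv_fold_eq_sim (t : List Int) : ∀ (perm : Nat) (acc : Int),
    (List.range t.length).foldl
      (fun acc bit => if 2 ^ bit &&& perm == 0 then acc + t.getD bit 0 else acc * t.getD bit 0)
      acc = pvSim acc t perm := by
  induction t with
  | nil => intro perm acc; simp [pvSim]
  | cons x xs ih =>
    intro perm acc
    rw [List.length_cons, List.range_succ_eq_map]
    simp only [List.foldl_cons, List.foldl_map, List.getD_cons_zero, List.getD_cons_succ,
      pv_pow_and_eq_zero, pow_zero, Nat.testBit_zero, pvSim]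
    have hbody : (fun (acc : Int) (bit : Nat) =>
        if !(perm.testBit (bit + 1)) then acc + xs.getD bit 0 else acc * xs.getD bit 0)
        = (fun (acc : Int) (bit : Nat) =>
        if 2 ^ bit &&& (perm / 2) == 0 then acc + xs.getD bit 0 else acc * xs.getD bit 0) := by
      funext a b
      simp [pv_pow_and_eq_zero, Nat.testBit_add_one]
    have hc : (perm % 2 == 0) = (!decide (perm % 2 = 1)) := by
      rcases Nat.mod_two_eq_zero_or_one perm with h | h <;> simp [h]
    simp only [Nat.succ_eq_add_one, hc, hbody, ih]

theorem pv_reach_eq_any (target : Int) (t : List Int) : ∀ (acc : Int),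
    pvReach target acc t
      = (List.range (2 ^ t.length)).any (fun perm => pvSim acc t perm == target) := by
  induction t with
  | nil =>
    intro acc
    simp [pvReach, pvSim, List.range_succ]  -- range 1 = [0]
  | cons x xs ih =>
    intro acc
    rw [Bool.eq_iff_iff]
    simp only [pvReach, Bool.or_eq_true, ih, List.any_eq_true, List.mem_range, pvSim,
      List.length_cons, beq_iff_eq]
    constructor
    · have h2 : (2:ℕ) ^ (xs.length + 1) = 2 * 2 ^ xs.length := by ring
      rintro (⟨p, hp, he⟩ | ⟨p, hp, he⟩)
      · refine ⟨2 * p, by omega, ?_⟩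
        have h1 : (2 * p) % 2 = 0 := by omega
        have h2 : (2 * p) / 2 = p := by omega
        simp [h1, h2, he]
      · refine ⟨2 * p + 1, by omega, ?_⟩
        have h1 : (2 * p + 1) % 2 = 1 := by omega
        have h2 : (2 * p + 1) / 2 = p := by omega
        simp [h1, h2, he]
    · rintro ⟨p, hp, he⟩
      have hp2 : p / 2 < 2 ^ xs.length := by
        have h2 : (2 : Nat) ^ (xs.length + 1) = 2 * 2 ^ xs.length := by ring
        rw [h2] at hp; omega
      rcases Nat.even_or_odd p with hpar | hpar
      · left
        refine ⟨p / 2, hp2, ?_⟩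
        have h1 : p % 2 = 0 := Nat.even_iff.mp hpar
        simpa [h1] using he
      · right
        refine ⟨p / 2, hp2, ?_⟩
        have h1 : p % 2 = 1 := Nat.odd_iff.mp hpar
        simpa [h1] using he

-- ===== VERDICT (by name: the statement is the Claim_ definition above) =====
theorem perm_calculation_spec : Claim_equal_perm_calculation := by
  intro target sequence _ hpre
  unfold Spec_perm_calculation
  match sequence with
  | [] => exact absurd rfl hpre
  | h :: t =>
    unfold perm_calculation perm_calculation_alt
    simp only [List.length_cons, Nat.add_sub_cancel, List.getD_cons_zero, List.getD_cons_succ]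
    rw [pv_reach_eq_any]
    exact List.any_congr rfl (fun perm => by rw [pv_fold_eq_sim])
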